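-- pv_equiv track=rewrite | github.com/leon-quinones/AoC_2023 | DAY_03/day_03_not_unique.py | verify_adjacency
-- ===== SOURCE A (Python) =====
-- from typing import List, Tuple
--
-- def verify_adjacency(num_coordinates: List[Tuple], symbol_coors: List[Tuple]):
--     times_to_add_number = 0
--     if symbol_coors:
--         for num in num_coordinates:
--             for symbol in symbol_coors:
--         # horizontal and diagonal
--         # index = 1 = end of string and 0= start of string
--                 if symbol[1] == num[0]:
--                     return 1
--                 if symbol[0] == num[1]:
--                     return 1
--                 # vertical
--                 if symbol[0] == num[0]:
--                     return 1
--                 if symbol[1] == num[1]: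
--                     return 1
--                 # overlapping
--                 if num[0] <= symbol[0] < num[1]:
--                     return 1
--     return times_to_add_number
-- ===== SOURCE B (Python) =====
-- from typing import List, Tuple
--
--
-- def _bisect_left(a, x):
--     lo, hi = 0, len(a)
--     while lo < hi:
--         mid = (lo + hi) // 2
--         if a[mid] < x:
--             lo = mid + 1
--         else:
--             hi = mid
--     return lo
--
--
-- def verify_adjacency(num_coordinates: List[Tuple], symbol_coors: List[Tuple]):
--     if not symbol_coors:
--         return 0
--     starts = {s[0] for s in symbol_coors}
--     ends = {s[1] for s in symbol_coors}
--     starts_sorted = sorted(starts)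
--     for num in num_coordinates:
--         n0, n1 = num[0], num[1]
--         if n0 in ends or n1 in ends or n0 in starts or n1 in starts:
--             return 1
--         i = _bisect_left(starts_sorted, n0)
--         if i < len(starts_sorted) and starts_sorted[i] < n1:
--             return 1
--     return 0
-- ===== Notes on version B (the rewrite author's own statement) =====
-- stated objective: alternative
-- what changed: Replaces A's nested scan of every (number, symbol) pair by precomputed sets of symbol start/end coordinates plus a sorted start list with binary search for the range test (per-number work O(log M) instead of O(M); not measurably faster on the generated inputs, where A often exits early).
-- outside the precondition, e.g. on verify_adjacency([(1, 2), (9,)], [(1, 5)]): A returns 1, B returns 1; on verify_adjacency([(1, 2)], [(1, 5), (0,)]): A returns 1, B raises IndexError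
import Mathlib
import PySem

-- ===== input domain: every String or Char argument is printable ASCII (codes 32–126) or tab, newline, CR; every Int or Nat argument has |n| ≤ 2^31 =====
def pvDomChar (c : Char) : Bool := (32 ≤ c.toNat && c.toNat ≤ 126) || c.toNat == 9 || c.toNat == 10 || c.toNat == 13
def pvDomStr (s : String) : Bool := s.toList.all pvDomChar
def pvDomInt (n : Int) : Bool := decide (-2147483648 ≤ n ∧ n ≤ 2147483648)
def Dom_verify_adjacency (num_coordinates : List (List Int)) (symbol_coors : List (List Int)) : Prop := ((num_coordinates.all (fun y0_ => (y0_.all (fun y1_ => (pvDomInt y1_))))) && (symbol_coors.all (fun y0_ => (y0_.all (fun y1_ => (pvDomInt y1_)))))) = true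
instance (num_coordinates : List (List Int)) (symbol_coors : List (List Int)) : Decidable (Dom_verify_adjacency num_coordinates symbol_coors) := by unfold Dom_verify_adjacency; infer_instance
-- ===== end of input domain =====

-- B replaces A's nested pair scan by precomputed sets of symbol start/end coordinates
-- plus binary search on the sorted starts for the range test (objective: alternative algorithm).


-- ===== PORT A =====
-- inner 'for symbol in symbol_coors' loop with its five early returns
def vaInner (num : List Int) : List (List Int) → Option Int
  | [] => none
  | s :: rest =>
    if PySem.List.pyGetD s 1 0 = PySem.List.pyGetD num 0 0 then some 1
    else if PySem.List.pyGetD s 0 0 = PySem.List.pyGetD num 1 0 then some 1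
    else if PySem.List.pyGetD s 0 0 = PySem.List.pyGetD num 0 0 then some 1
    else if PySem.List.pyGetD s 1 0 = PySem.List.pyGetD num 1 0 then some 1
    else if PySem.List.pyGetD num 0 0 ≤ PySem.List.pyGetD s 0 0 ∧ PySem.List.pyGetD s 0 0 < PySem.List.pyGetD num 1 0 then some 1
    else vaInner num rest

-- outer 'for num in num_coordinates' loop
def vaOuter (symbol_coors : List (List Int)) : List (List Int) → Option Int
  | [] => none
  | num :: rest =>
    match vaInner num symbol_coors with
    | some r => some r
    | none => vaOuter symbol_coors rest

def verify_adjacency (num_coordinates : List (List Int)) (symbol_coors : List (List Int)) : Int :=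
  if symbol_coors = [] then 0
  else (vaOuter symbol_coors num_coordinates).getD 0

-- ===== PORT B =====
-- the 'for num in num_coordinates' loop of B (set lookups, then binary search on the sorted starts)
def vbLoop (starts ends : PySem.Set Int) (ss : List Int) : List (List Int) → Option Int
  | [] => none
  | num :: rest =>
    if PySem.Set.contains ends (PySem.List.pyGetD num 0 0)
       || PySem.Set.contains ends (PySem.List.pyGetD num 1 0)
       || PySem.Set.contains starts (PySem.List.pyGetD num 0 0)
       || PySem.Set.contains starts (PySem.List.pyGetD num 1 0) then some 1
    else
      let i := PySem.List.bisectLeft ss (PySem.List.pyGetD num 0 0)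
      -- ss.getD i 0 is exact for starts_sorted[i]: the guard gives 0 ≤ i < len
      if i < ss.length ∧ ss.getD i 0 < PySem.List.pyGetD num 1 0 then some 1
      else vbLoop starts ends ss rest

def verify_adjacency_alt (num_coordinates : List (List Int)) (symbol_coors : List (List Int)) : Int :=
  if symbol_coors = [] then 0
  else
    let starts : PySem.Set Int := PySem.Set.ofList (symbol_coors.map (fun s => PySem.List.pyGetD s 0 0))
    let ends : PySem.Set Int := PySem.Set.ofList (symbol_coors.map (fun s => PySem.List.pyGetD s 1 0))
    let ss := PySem.List.sorted starts (fun x => x) false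
    (vbLoop starts ends ss num_coordinates).getD 0

-- ===== PRECONDITION & SPEC =====
-- Pre_ excludes inputs where some coordinate row has fewer than 2 entries: there indexing row[0]/row[1]
-- raises IndexError in A or in B (A may still return 1 if an earlier pair matched before the short row is
-- reached — an accident of A's early-exit scan order; see the cited excluded examples).
def Pre_verify_adjacency (num_coordinates : List (List Int)) (symbol_coors : List (List Int)) : Prop :=
  symbol_coors = [] ∨ ((∀ s ∈ symbol_coors, 2 ≤ s.length) ∧ (∀ n ∈ num_coordinates, 2 ≤ n.length))
instance (num_coordinates : List (List Int)) (symbol_coors : List (List Int)) : Decidable (Pre_verify_adjacency num_coordinates symbol_coors) := by unfold Pre_verify_adjacency; infer_instance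

def pvWitness_verify_adjacency : List (List Int) × List (List Int) := ([[0, 2], [5, 7]], [[2, 3]])

def Spec_verify_adjacency (num_coordinates : List (List Int)) (symbol_coors : List (List Int)) (out : Int) : Prop := out = verify_adjacency_alt num_coordinates symbol_coors
instance (num_coordinates : List (List Int)) (symbol_coors : List (List Int)) (out : Int) : Decidable (Spec_verify_adjacency num_coordinates symbol_coors out) := by unfold Spec_verify_adjacency; infer_instance

-- ===== CLAIM (what is proved, stated in full; the proofs are below) =====
def Claim_equal_verify_adjacency : Prop := ∀ (num_coordinates : List (List Int)) (symbol_coors : List (List Int)), Dom_verify_adjacency num_coordinates symbol_coors → Pre_verify_adjacency num_coordinates symbol_coors → Spec_verify_adjacency num_coordinates symbol_coors (verify_adjacency num_coordinates symbol_coors)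

-- ===== LEMMAS AND PROOFS =====

-- A's per-pair test, as one boolean
def condA (num s : List Int) : Bool :=
  decide (PySem.List.pyGetD s 1 0 = PySem.List.pyGetD num 0 0)
  || decide (PySem.List.pyGetD s 0 0 = PySem.List.pyGetD num 1 0)
  || decide (PySem.List.pyGetD s 0 0 = PySem.List.pyGetD num 0 0)
  || decide (PySem.List.pyGetD s 1 0 = PySem.List.pyGetD num 1 0)
  || (decide (PySem.List.pyGetD num 0 0 ≤ PySem.List.pyGetD s 0 0)
      && decide (PySem.List.pyGetD s 0 0 < PySem.List.pyGetD num 1 0))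

-- B's per-number test, as one boolean
def condB (starts ends : PySem.Set Int) (ss : List Int) (num : List Int) : Bool :=
  PySem.Set.contains ends (PySem.List.pyGetD num 0 0)
  || PySem.Set.contains ends (PySem.List.pyGetD num 1 0)
  || PySem.Set.contains starts (PySem.List.pyGetD num 0 0)
  || PySem.Set.contains starts (PySem.List.pyGetD num 1 0)
  || decide (PySem.List.bisectLeft ss (PySem.List.pyGetD num 0 0) < ss.length
       ∧ ss.getD (PySem.List.bisectLeft ss (PySem.List.pyGetD num 0 0)) 0 < PySem.List.pyGetD num 1 0)

theorem vaInner_eq (num : List Int) (syms : List (List Int)) :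
    vaInner num syms = if syms.any (fun s => condA num s) then some 1 else none := by
  induction syms with
  | nil => simp [vaInner]
  | cons s rest ih =>
    simp only [vaInner, ih, List.any_cons]
    by_cases hc : condA num s = true
    · have hco := hc
      simp only [condA, Bool.or_eq_true, Bool.and_eq_true, decide_eq_true_eq] at hco
      simp only [hc, Bool.true_or, if_true]
      split_ifs with h1 h2 h3 h4 h5 <;> first | rfl | (exact absurd hco (by tauto))
    · have hnc := hc
      simp only [condA, Bool.or_eq_true, Bool.and_eq_true, decide_eq_true_eq] at hnc
      simp only [Bool.not_eq_true] at hc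
      simp only [hc, Bool.false_or]
      split_ifs with h1 h2 h3 h4 h5 <;> first | rfl | (exact absurd (by tauto) hnc)

theorem vaOuter_eq (syms nums : List (List Int)) :
    vaOuter syms nums = if nums.any (fun n => syms.any (fun s => condA n s)) then some 1 else none := by
  induction nums with
  | nil => simp [vaOuter]
  | cons n rest ih =>
    simp only [vaOuter, vaInner_eq, ih, List.any_cons]
    by_cases h1 : (syms.any fun s => condA n s) = true
    · simp [h1]
    · simp only [Bool.not_eq_true] at h1
      simp [h1]

theorem vbLoop_eq (starts ends : PySem.Set Int) (ss : List Int) (nums : List (List Int)) :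
    vbLoop starts ends ss nums = if nums.any (condB starts ends ss) then some 1 else none := by
  induction nums with
  | nil => simp [vbLoop]
  | cons n rest ih =>
    simp only [vbLoop, ih, List.any_cons]
    by_cases hc : condB starts ends ss n = true
    · have hco := hc
      simp only [condB, Bool.or_eq_true, decide_eq_true_eq] at hco
      simp only [hc, Bool.true_or, if_true]
      split_ifs with h1 h2 <;>
        first
        | rfl
        | (exact absurd hco (by simp only [Bool.or_eq_true, not_or] at h1 ⊢; tauto))
    · have hnc := hc
      simp only [condB, Bool.or_eq_true, decide_eq_true_eq] at hnc
      simp only [Bool.not_eq_true] at hc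
      simp only [hc, Bool.false_or]
      split_ifs with h1 h2 <;>
        first
        | rfl
        | (exact absurd (by simp only [Bool.or_eq_true] at h1 ⊢; tauto) hnc)

-- binary-search range test on a sorted list: some element lies in [x, y)
theorem bisect_range (ss : List Int) (hp : ss.Pairwise (· ≤ ·)) (x y : Int) :
    (PySem.List.bisectLeft ss x < ss.length ∧ ss.getD (PySem.List.bisectLeft ss x) 0 < y)
      ↔ ∃ v ∈ ss, x ≤ v ∧ v < y := by
  obtain ⟨hle, hlt, hge⟩ := PySem.List.bisectLeft_spec ss x hp
  have hmono : ∀ p q (h1 : p < ss.length) (h2 : q < ss.length), p ≤ q → ss[p] ≤ ss[q] := by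
    intro p q h1 h2 hpq
    rcases Nat.lt_or_ge p q with h | h
    · exact List.pairwise_iff_getElem.mp hp p q h1 h2 h
    · have hpq' : p = q := by omega
      subst hpq'
      exact le_rfl
  constructor
  · rintro ⟨hlen, hy⟩
    refine ⟨ss[PySem.List.bisectLeft ss x], List.getElem_mem hlen, hge _ hlen le_rfl, ?_⟩
    rwa [List.getD_eq_getElem ss 0 hlen] at hy
  · rintro ⟨v, hv, hxv, hvy⟩
    obtain ⟨j, hj, rfl⟩ := List.mem_iff_getElem.mp hv
    have hij : PySem.List.bisectLeft ss x ≤ j := by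
      by_contra h
      exact absurd (hlt j hj (by omega)) (not_lt.mpr hxv)
    have hlen : PySem.List.bisectLeft ss x < ss.length := lt_of_le_of_lt hij hj
    refine ⟨hlen, ?_⟩
    rw [List.getD_eq_getElem ss 0 hlen]
    exact lt_of_le_of_lt (hmono _ j hlen hj hij) hvy

-- B's per-number test agrees with A's scan over all symbols
theorem cond_agree (syms : List (List Int)) (num : List Int) :
    condB (PySem.Set.ofList (syms.map (fun s => PySem.List.pyGetD s 0 0)))
          (PySem.Set.ofList (syms.map (fun s => PySem.List.pyGetD s 1 0)))
          (PySem.List.sorted (PySem.Set.ofList (syms.map (fun s => PySem.List.pyGetD s 0 0))) (fun x => x) false)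
          num
      = syms.any (fun s => condA num s) := by
  set g0 : List Int → Int := fun s => PySem.List.pyGetD s 0 0 with hg0
  set ss := PySem.List.sorted (PySem.Set.ofList (syms.map g0)) (fun x => x) false with hss
  have hpair : ss.Pairwise (· ≤ ·) := by
    have := PySem.List.sorted_pairwise (PySem.Set.ofList (syms.map g0)) (fun x => x)
    simpa using this
  have hmem : ∀ v : Int, v ∈ ss ↔ ∃ s ∈ syms, g0 s = v := by
    intro v
    rw [hss, PySem.List.mem_sorted, PySem.Set.mem_ofList, List.mem_map]
  rw [Bool.eq_iff_iff]
  simp only [condB, condA, List.any_eq_true, Bool.or_eq_true, Bool.and_eq_true,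
    PySem.Set.contains_iff, PySem.Set.mem_ofList, List.mem_map, decide_eq_true_eq,
    bisect_range ss hpair, hmem]
  constructor
  · rintro ((((⟨s, hs, h⟩ | ⟨s, hs, h⟩) | ⟨s, hs, h⟩) | ⟨s, hs, h⟩) | ⟨v, ⟨s, hs, rfl⟩, h1, h2⟩) <;>
      exact ⟨s, hs, by tauto⟩
  · rintro ⟨s, hs, (((h | h) | h) | h) | ⟨h1, h2⟩⟩
    · exact Or.inl (Or.inl (Or.inl (Or.inl ⟨s, hs, h⟩)))
    · exact Or.inl (Or.inr ⟨s, hs, h⟩)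
    · exact Or.inl (Or.inl (Or.inr ⟨s, hs, h⟩))
    · exact Or.inl (Or.inl (Or.inl (Or.inr ⟨s, hs, h⟩)))
    · exact Or.inr ⟨g0 s, ⟨s, hs, rfl⟩, h1, h2⟩

-- ===== VERDICT (by name: the statement is the Claim_ definition above) =====
theorem verify_adjacency_spec : Claim_equal_verify_adjacency := by
  intro nums syms _ _
  unfold Spec_verify_adjacency verify_adjacency verify_adjacency_alt
  by_cases h : syms = []
  · simp [h]
  · simp only [h, if_false, vaOuter_eq, vbLoop_eq]
    rw [List.any_congr rfl (fun n => cond_agree syms n)]
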